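-- pv_equiv track=rewrite | github.com/viveksoorya/2k39-bioemu-200-samples | chimera/share/StructSeqAlign/__init__.py | alignedCols
-- ===== SOURCE A (Python) =====
-- def alignedCols(seqs):
-- 	aligned = []
-- 	for i, chars in enumerate(zip(*tuple([s[:] for s in seqs]))):
-- 		for c in chars:
-- 			if not c.isalpha():
-- 				break
-- 		else:
-- 			aligned.append(i)
-- 	return aligned
-- ===== SOURCE B (Python) =====
-- def alignedCols(seqs):
-- 	L = min((len(s) for s in seqs), default=0)
-- 	bad = set()
-- 	for s in seqs:
-- 		for j in range(L):
-- 			if not s[j].isalpha():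
-- 				bad.add(j)
-- 	return [j for j in range(L) if j not in bad]
-- ===== Notes on version B (the rewrite author's own statement) =====
-- stated objective: alternative
-- what changed: Row-major single pass maintaining a set of disqualified column indices, instead of materialising the columns with zip(*...) and scanning each column with a break/else loop.
import Mathlib
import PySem

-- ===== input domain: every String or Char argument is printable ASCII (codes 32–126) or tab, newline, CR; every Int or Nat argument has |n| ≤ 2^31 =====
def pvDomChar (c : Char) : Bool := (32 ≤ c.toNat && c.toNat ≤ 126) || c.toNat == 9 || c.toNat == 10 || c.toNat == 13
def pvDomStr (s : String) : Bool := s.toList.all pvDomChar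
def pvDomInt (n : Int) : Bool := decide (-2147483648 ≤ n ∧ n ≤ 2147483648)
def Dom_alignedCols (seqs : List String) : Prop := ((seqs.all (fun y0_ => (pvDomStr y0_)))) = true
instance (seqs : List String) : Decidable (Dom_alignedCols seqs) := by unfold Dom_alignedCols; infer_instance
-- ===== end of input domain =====

-- B traverses row-major keeping a set of disqualified columns instead of zipping into columns; same cost, different decomposition.

-- ===== PORT A =====
-- zip(*rows) truncates to the minimum row length (0 when there are no rows)
def pyMinLenA (rows : List (List Char)) : Nat :=
  match rows with
  | [] => 0
  | r :: rs => rs.foldl (fun m x => min m x.length) r.length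

-- the inner 'for c in chars: if not c.isalpha(): break / else append' loop
def colAlphaLoop : List Char → Bool
  | [] => true
  | c :: cs => if !(PySem.Chars.isalpha c) then false else colAlphaLoop cs

def alignedCols (seqs : List String) : List Int :=
  let rows := seqs.map String.toList
  let L := pyMinLenA rows
  -- zip(*tuple([s[:] for s in seqs])): column i holds each row's char at i (i < L ≤ every row length, so getD is exact)
  let cols := (List.range L).map (fun i => rows.map (fun r => r.getD i ' '))
  (PySem.List.enumerate cols 0).foldl
    (fun acc p => if colAlphaLoop p.2 then acc ++ [p.1] else acc) []

-- ===== PORT B =====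
def alignedCols_alt (seqs : List String) : List Int :=
  let L : Int := match PySem.List.min? (seqs.map (fun s => PySem.Str.len s)) (fun x => x) with
    | none => 0
    | some m => m
  let bad : PySem.Set Int := seqs.foldl (fun b s =>
    (PySem.List.pyRange 0 L 1).foldl (fun b j =>
      match PySem.Str.pyGet? s j with   -- s[j]; j < L ≤ len(s), so never none
      | some c => if !(PySem.Chars.isalpha c) then PySem.Set.add b j else b
      | none => b) b) PySem.Set.empty
  (PySem.List.pyRange 0 L 1).filter (fun j => !(PySem.Set.contains bad j))

-- ===== PRECONDITION & SPEC =====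
def Spec_alignedCols (seqs : List String) (out : List Int) : Prop := out = alignedCols_alt seqs
instance (seqs : List String) (out : List Int) : Decidable (Spec_alignedCols seqs out) := by unfold Spec_alignedCols; infer_instance

-- ===== CLAIM (what is proved, stated in full; the proofs are below) =====
def Claim_equal_alignedCols : Prop := ∀ (seqs : List String), Dom_alignedCols seqs → Spec_alignedCols seqs (alignedCols seqs)

-- ===== LEMMAS AND PROOFS =====

theorem colAlphaLoop_eq_all (cs : List Char) : colAlphaLoop cs = cs.all PySem.Chars.isalpha := by
  induction cs with
  | nil => rfl
  | cons c cs ih =>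
    simp only [colAlphaLoop, List.all_cons, ih]
    cases PySem.Chars.isalpha c <;> simp

theorem foldl_min_le_init (rs : List (List Char)) (a : Nat) :
    rs.foldl (fun m x => min m x.length) a ≤ a := by
  induction rs generalizing a with
  | nil => simp
  | cons r rs ih => exact le_trans (ih (min a r.length)) (min_le_left _ _)

theorem foldl_min_le_mem (rs : List (List Char)) (a : Nat) (r : List Char) (hr : r ∈ rs) :
    rs.foldl (fun m x => min m x.length) a ≤ r.length := by
  induction rs generalizing a with
  | nil => simp at hr
  | cons x xs ih =>
    rcases List.mem_cons.mp hr with h | h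
    · subst h
      exact le_trans (foldl_min_le_init xs (min a r.length)) (min_le_right _ _)
    · exact ih _ h

theorem pyMinLenA_le (rows : List (List Char)) (r : List Char) (hr : r ∈ rows) :
    pyMinLenA rows ≤ r.length := by
  match rows, hr with
  | r0 :: rs, hr =>
    simp only [pyMinLenA]
    rcases List.mem_cons.mp hr with h | h
    · subst h; exact foldl_min_le_init rs r.length
    · exact foldl_min_le_mem rs r0.length r h

theorem foldl_min_cast (ss : List String) (a : Nat) :
    (ss.map (fun s => PySem.Str.len s)).foldl min (a : Int)
      = (((ss.map String.toList).foldl (fun m x => min m x.length) a : Nat) : Int) := by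
  induction ss generalizing a with
  | nil => simp
  | cons s ss ih =>
    simp only [List.map_cons, List.foldl_cons]
    have h1 : min (a : Int) (PySem.Str.len s) = ((min a s.toList.length : Nat) : Int) := by
      simp only [PySem.Str.len_eq, String.length_toList]
      omega
    rw [h1, ih]

theorem mem_foldl_addif (l : List Int) (Q : Int → Bool) (b : PySem.Set Int) (j : Int) :
    (j ∈ l.foldl (fun b x => if Q x then PySem.Set.add b x else b) b)
      ↔ (j ∈ b ∨ (j ∈ l ∧ Q j = true)) := by
  induction l generalizing b with
  | nil => simp
  | cons x l ih =>
    simp only [List.foldl_cons]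
    rw [ih]
    by_cases hq : Q x = true
    · simp only [hq, if_true, PySem.Set.mem_add, List.mem_cons]
      constructor
      · rintro ((hb | he) | ⟨hm, hj⟩)
        · exact Or.inl hb
        · exact Or.inr ⟨Or.inl he, he ▸ hq⟩
        · exact Or.inr ⟨Or.inr hm, hj⟩
      · rintro (hb | ⟨(he | hm), hj⟩)
        · exact Or.inl (Or.inl hb)
        · exact Or.inl (Or.inr he)
        · exact Or.inr ⟨hm, hj⟩
    · simp only [hq, Bool.false_eq_true, if_false, List.mem_cons]
      constructor
      · rintro (hb | ⟨hm, hj⟩)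
        · exact Or.inl hb
        · exact Or.inr ⟨Or.inr hm, hj⟩
      · rintro (hb | ⟨(he | hm), hj⟩)
        · exact Or.inl hb
        · exact absurd (he ▸ hj) hq
        · exact Or.inr ⟨hm, hj⟩

-- one string's inner loop over range(L)
theorem inner_mem (s : String) (L : Int) (hs : L ≤ (s.toList.length : Int))
    (b : PySem.Set Int) (j : Int) :
    (j ∈ (PySem.List.pyRange 0 L 1).foldl (fun b j =>
        match PySem.Str.pyGet? s j with
        | some c => if !(PySem.Chars.isalpha c) then PySem.Set.add b j else b
        | none => b) b)
    ↔ (j ∈ b ∨ ((0 ≤ j ∧ j < L) ∧ ¬ PySem.Chars.isalpha (s.toList.getD j.toNat ' '))) := by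
  have hcong : (PySem.List.pyRange 0 L 1).foldl (fun b j =>
        match PySem.Str.pyGet? s j with
        | some c => if !(PySem.Chars.isalpha c) then PySem.Set.add b j else b
        | none => b) b
      = (PySem.List.pyRange 0 L 1).foldl
          (fun b x => if !(PySem.Chars.isalpha (s.toList.getD x.toNat ' ')) then PySem.Set.add b x else b) b := by
    apply PySem.List.foldl_congr_mem
    intro acc x hx
    rcases (PySem.List.mem_pyRange_one).mp hx with ⟨hx0, hxL⟩
    have hget : PySem.Str.pyGet? s x = some (s.toList.getD x.toNat ' ') := by
      rw [PySem.Str.pyGet?_eq, PySem.Chars.pyGet?_eq_listPyGet?,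
        PySem.List.pyGet?_of_nonneg s.toList hx0]
      have hlt : x.toNat < s.toList.length := by omega
      rw [List.getElem?_eq_getElem hlt, List.getD_eq_getElem _ _ hlt]
    rw [hget]
  rw [hcong, mem_foldl_addif]
  simp only [PySem.List.mem_pyRange_one, Bool.not_eq_true', Bool.eq_false_iff, ne_eq]

theorem minInt_eq (seqs : List String) :
    (match PySem.List.min? (seqs.map (fun s => PySem.Str.len s)) (fun x => x) with
      | none => 0
      | some m => m) = (pyMinLenA (seqs.map String.toList) : Int) := by
  cases seqs with
  | nil => simp [PySem.List.min?, pyMinLenA]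
  | cons s ss =>
    rw [List.map_cons, PySem.List.min?_id_cons]
    simp only [List.map_cons, pyMinLenA]
    have h := foldl_min_cast ss s.toList.length
    simp only [PySem.Str.len_eq] at h ⊢
    rw [show ((s.toList.length : Nat) : Int) = (s.length : Int) by rw [String.length_toList]] at h
    exact h

-- enumerate of a range-map
theorem enumerate_range_map {α : Type} (f : Nat → α) (L : Nat) (s : Int) :
    PySem.List.enumerate ((List.range L).map f) s
      = (List.range L).map (fun (k : Nat) => (s + (k : Int), f k)) := by
  induction L with
  | zero => simp [PySem.List.enumerate_nil]
  | succ L ih =>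
    rw [List.range_succ, List.map_append, PySem.List.enumerate_append, ih, List.map_append]
    simp [PySem.List.enumerate_cons]

theorem foldl_append_filter {α : Type} (P : Int × α → Bool) (xs : List (Int × α)) (acc : List Int) :
    xs.foldl (fun acc p => if P p then acc ++ [p.1] else acc) acc
      = acc ++ (xs.filter P).map (·.1) := by
  induction xs generalizing acc with
  | nil => simp
  | cons x xs ih =>
    simp only [List.foldl_cons, List.filter_cons]
    cases h : P x <;> simp [ih]

-- membership in the "bad" set B builds
theorem bad_mem (seqs : List String) (L : Int) (hL : ∀ s ∈ seqs, L ≤ (s.toList.length : Int))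
    (b : PySem.Set Int) (j : Int) :
    (j ∈ seqs.foldl (fun b s =>
      (PySem.List.pyRange 0 L 1).foldl (fun b j =>
        match PySem.Str.pyGet? s j with
        | some c => if !(PySem.Chars.isalpha c) then PySem.Set.add b j else b
        | none => b) b) b)
    ↔ (j ∈ b ∨ ((0 ≤ j ∧ j < L) ∧ ∃ s ∈ seqs, ¬ PySem.Chars.isalpha (s.toList.getD j.toNat ' '))) := by
  induction seqs generalizing b with
  | nil => simp
  | cons s ss ih =>
    simp only [List.foldl_cons]
    rw [ih (fun r hr => hL r (List.mem_cons_of_mem s hr))]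
    rw [inner_mem s L (by simpa using hL s List.mem_cons_self) b j]
    constructor
    · rintro ((hb | ⟨hr, hq⟩) | ⟨hr, r, hrm, hq⟩)
      · exact Or.inl hb
      · exact Or.inr ⟨hr, s, List.mem_cons_self, hq⟩
      · exact Or.inr ⟨hr, r, List.mem_cons_of_mem s hrm, hq⟩
    · rintro (hb | ⟨hr, r, hrm, hq⟩)
      · exact Or.inl (Or.inl hb)
      · rcases List.mem_cons.mp hrm with h' | h'
        · exact Or.inl (Or.inr ⟨hr, h' ▸ hq⟩)
        · exact Or.inr ⟨hr, r, h', hq⟩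

-- ===== VERDICT (by name: the statement is the Claim_ definition above) =====
theorem B_canon (seqs : List String) (L : Int) (hL : ∀ s ∈ seqs, L ≤ (s.toList.length : Int)) :
    ((PySem.List.pyRange 0 L 1).filter (fun j =>
        !(PySem.Set.contains (seqs.foldl (fun b s =>
          (PySem.List.pyRange 0 L 1).foldl (fun b j =>
            match PySem.Str.pyGet? s j with
            | some c => if !(PySem.Chars.isalpha c) then PySem.Set.add b j else b
            | none => b) b) PySem.Set.empty) j)))
    = (PySem.List.pyRange 0 L 1).filter (fun j =>
        seqs.all (fun s => PySem.Chars.isalpha (s.toList.getD j.toNat ' '))) := by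
  apply List.filter_congr
  intro j hj
  rcases PySem.List.mem_pyRange_one.mp hj with ⟨h0, hjL⟩
  have hmem := bad_mem seqs L hL PySem.Set.empty j
  rw [Bool.eq_iff_iff, Bool.not_eq_true', ← Bool.not_eq_true, PySem.Set.contains_iff, hmem,
    List.all_eq_true]
  constructor
  · intro h s hs
    by_contra hc
    exact h (Or.inr ⟨⟨h0, hjL⟩, s, hs, hc⟩)
  · rintro h (he | ⟨_, s, hs, hc⟩)
    · simp [PySem.Set.empty] at he
    · exact hc (h s hs)

theorem alignedCols_spec : Claim_equal_alignedCols := by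
  intro seqs _
  unfold Spec_alignedCols
  simp only [alignedCols, alignedCols_alt]
  rw [minInt_eq seqs]
  have hL : ∀ s ∈ seqs, ((pyMinLenA (seqs.map String.toList) : Nat) : Int) ≤ (s.toList.length : Int) := by
    intro s hs
    exact_mod_cast pyMinLenA_le (seqs.map String.toList) s.toList (List.mem_map_of_mem hs)
  rw [B_canon seqs _ hL]
  rw [enumerate_range_map, foldl_append_filter, List.nil_append]
  rw [List.filter_map, List.map_map]
  rw [PySem.List.pyRange_zero_natCast, List.filter_map]
  rw [List.filter_congr (q := ((fun j : Int =>
        seqs.all (fun s => PySem.Chars.isalpha (s.toList.getD j.toNat ' '))) ∘ (fun k : Nat => (k : Int))))]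
  · apply List.map_congr_left
    intro k _
    simp
  · intro k _
    simp only [Function.comp_apply, colAlphaLoop_eq_all, List.all_map, Int.toNat_natCast]
    rfl
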